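-- pv_equiv track=rewrite | github.com/arunma/dsa_python | ik/recursion/find_all_well_formed_brackets.py | find_all_well_formed_brackets
-- ===== SOURCE A (Python) =====
-- def find_all_well_formed_brackets(n):
--     stack = [("(", 1, 0)]
--     result = []
--     while stack:
--         curr, left, right = stack.pop()
--         if left == right == n:
--             result.append(curr)
--             continue
--         if left < n:
--             stack.append((curr + "(", left + 1, right))
--         if right < left:
--             stack.append((curr + ")", left, right + 1))
--     return result
-- ===== SOURCE B (Python) =====
-- def find_all_well_formed_brackets(n):
--     def rec(curr, left, right):
--         if left == n and right == n:
--             return [curr]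
--         out = []
--         if right < left:
--             out += rec(curr + ")", left, right + 1)
--         if left < n:
--             out += rec(curr + "(", left + 1, right)
--         return out
--     return rec("(", 1, 0)
-- ===== Notes on version B (the rewrite author's own statement) =====
-- stated objective: simpler
-- what changed: Replaces A's explicit stack and while-loop with a direct recursive backtracking helper (close-branch explored first, seeded from the same single-open-bracket start state as A), reproducing A's output order without managing a stack of frames.
import Mathlib
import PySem

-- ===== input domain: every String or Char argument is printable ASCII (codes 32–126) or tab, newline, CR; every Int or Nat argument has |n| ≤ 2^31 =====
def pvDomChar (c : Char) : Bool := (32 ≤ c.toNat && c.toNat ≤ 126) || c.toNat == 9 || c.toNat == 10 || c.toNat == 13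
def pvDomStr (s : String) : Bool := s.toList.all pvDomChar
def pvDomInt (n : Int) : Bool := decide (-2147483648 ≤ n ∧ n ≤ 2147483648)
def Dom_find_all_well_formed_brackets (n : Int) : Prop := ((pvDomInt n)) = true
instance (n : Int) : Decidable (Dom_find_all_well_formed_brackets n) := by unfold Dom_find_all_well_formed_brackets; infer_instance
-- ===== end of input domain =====

-- B replaces A's explicit stack/while loop by recursive backtracking in the same traversal order; objective: simpler.

-- ===== PORT A =====

-- measure for one stack frame, used only for termination of the loop
def pvPhi (n left right : Int) : Nat := 2 * (n - left).toNat + (left - right).toNat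

-- measure of the whole stack
def pvM (n : Int) (stack : List (String × Int × Int)) : Nat :=
  (stack.map (fun e => 3 ^ pvPhi n e.2.1 e.2.2)).sum

theorem pvPhi_open {n l r : Int} (h : l < n) : pvPhi n (l + 1) r < pvPhi n l r := by
  unfold pvPhi; omega

theorem pvPhi_close {n l r : Int} (h : r < l) : pvPhi n l (r + 1) < pvPhi n l r := by
  unfold pvPhi; omega

theorem pv_two_pow_lt {a b p : Nat} (ha : a < p) (hb : b < p) : 3 ^ a + 3 ^ b < 3 ^ p := by
  have hpos : 0 < 3 ^ (p - 1) := Nat.pow_pos (by norm_num)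
  have h1 : 3 ^ a ≤ 3 ^ (p - 1) := Nat.pow_le_pow_right (by norm_num) (by omega)
  have h2 : 3 ^ b ≤ 3 ^ (p - 1) := Nat.pow_le_pow_right (by norm_num) (by omega)
  have h3 : 3 ^ (p - 1 + 1) = 3 ^ p := by congr 1; omega
  rw [pow_succ] at h3
  omega

-- the new-stack measure is smaller than the popped frame's contribution
theorem pvM_step {n l r : Int} (rest : List (String × Int × Int)) (c0 c1 c2 : String) :
    pvM n ((if r < l then [(c1, l, r + 1)] else []) ++
           (if l < n then [(c2, l + 1, r)] else []) ++ rest)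
      < pvM n ((c0, l, r) :: rest) := by
  have hpos : 0 < 3 ^ pvPhi n l r := Nat.pow_pos (by norm_num)
  by_cases hc : r < l <;> by_cases ho : l < n <;>
    simp only [pvM, hc, ho, if_true, if_false, List.map_append, List.map_cons, List.map_nil,
      List.sum_append, List.sum_cons, List.sum_nil, List.nil_append]
  · have := pv_two_pow_lt (pvPhi_close hc) (pvPhi_open ho); omega
  · have := Nat.pow_lt_pow_right (by norm_num : (1:Nat) < 3) (pvPhi_close (n := n) hc); omega
  · have := Nat.pow_lt_pow_right (by norm_num : (1:Nat) < 3) (pvPhi_open (r := r) ho); omega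
  · omega

-- the while loop of A: the head of the list is the top of Python's stack
def pvLoopA (n : Int) (stack : List (String × Int × Int)) (result : List String) : List String :=
  match stack with
  | [] => result
  | (curr, left, right) :: rest =>
    if left = right ∧ right = n then
      pvLoopA n rest (result ++ [curr])
    else
      -- Python pushes the "(" frame first, then the ")" frame, so ")" is on top
      pvLoopA n ((if right < left then [(curr ++ ")", left, right + 1)] else []) ++
                 (if left < n then [(curr ++ "(", left + 1, right)] else []) ++ rest) result
termination_by pvM n stack
decreasing_by
  · simp only [pvM, List.map_cons, List.sum_cons]
    have : 0 < 3 ^ pvPhi n left right := Nat.pow_pos (by norm_num)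
    omega
  · simp only [dite_eq_ite]
    exact pvM_step rest curr (curr ++ ")") (curr ++ "(")

def find_all_well_formed_brackets (n : Int) : List String := pvLoopA n [("(", 1, 0)] []

-- ===== PORT B =====

def pvRecB (n : Int) (curr : String) (left right : Int) : List String :=
  if left = n ∧ right = n then [curr]
  else
    (if right < left then pvRecB n (curr ++ ")") left (right + 1) else []) ++
    (if left < n then pvRecB n (curr ++ "(") (left + 1) right else [])
termination_by pvPhi n left right
decreasing_by
  · exact pvPhi_close (by assumption)
  · exact pvPhi_open (by assumption)

def find_all_well_formed_brackets_alt (n : Int) : List String := pvRecB n "(" 1 0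

-- ===== PRECONDITION & SPEC =====
def Spec_find_all_well_formed_brackets (n : Int) (out : List String) : Prop := out = find_all_well_formed_brackets_alt n
instance (n : Int) (out : List String) : Decidable (Spec_find_all_well_formed_brackets n out) := by unfold Spec_find_all_well_formed_brackets; infer_instance

-- ===== CLAIM (what is proved, stated in full; the proofs are below) =====
def Claim_equal_find_all_well_formed_brackets : Prop := ∀ (n : Int), Dom_find_all_well_formed_brackets n → Spec_find_all_well_formed_brackets n (find_all_well_formed_brackets n)

-- ===== LEMMAS AND PROOFS =====

-- A's loop from any stack appends, in order, the backtracking result of each frame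
theorem pvLoopA_eq (n : Int) (stack : List (String × Int × Int)) (result : List String) :
    pvLoopA n stack result
      = result ++ stack.flatMap (fun e => pvRecB n e.1 e.2.1 e.2.2) := by
  induction stack, result using pvLoopA.induct n with
  | case1 res => simp [pvLoopA]
  | case2 res c l r rest h ih =>
    obtain ⟨h1, h2⟩ := h
    subst h1; subst h2
    rw [pvLoopA, if_pos ⟨rfl, rfl⟩, ih, List.flatMap_cons, pvRecB, if_pos ⟨rfl, rfl⟩]
    simp
  | case3 res c l r rest h ih =>
    rw [pvLoopA]
    rw [if_neg h]
    simp only [dite_eq_ite] at ih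
    rw [ih, List.flatMap_cons, pvRecB]
    have hb : ¬ (l = n ∧ r = n) := by omega
    rw [if_neg hb]
    by_cases hc : r < l <;> by_cases ho : l < n <;> simp [hc, ho]

-- ===== VERDICT (by name: the statement is the Claim_ definition above) =====
theorem find_all_well_formed_brackets_spec : Claim_equal_find_all_well_formed_brackets := by
  intro n _
  unfold Spec_find_all_well_formed_brackets find_all_well_formed_brackets find_all_well_formed_brackets_alt
  rw [pvLoopA_eq]
  simp
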